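-- pv_equiv track=rewrite | github.com/miliar/Code_Jam_Webscraper | solutions_python/Problem_178/2938.py | flipstack
-- ===== SOURCE A (Python) =====
-- def flipstack(n,stack):
--     g=0
--     c=stack[0]
--     for s in stack[1:]:
--         if s!=c:
--             c=s
--             g+=1
--     if c=="-":# and g>1:
--         g+=1
--     return g
-- ===== SOURCE B (Python) =====
-- def flipstack(n, stack):
--     # divide-and-conquer: transitions in stack[lo:hi] = transitions of each half
--     # plus one if the halves meet with different symbols
--     def trans(lo, hi):
--         if hi - lo <= 1:
--             return 0
--         mid = (lo + hi) // 2
--         return trans(lo, mid) + trans(mid, hi) + (stack[mid - 1] != stack[mid])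
--     return trans(0, len(stack)) + (stack[-1] == "-")
-- ===== Notes on version B (the rewrite author's own statement) =====
-- stated objective: alternative
-- what changed: Replaces A's stateful linear scan (current-symbol accumulator) by a divide-and-conquer recursion on index ranges: transitions in stack[lo:hi] = transitions in the two halves plus an indicator at the split point, then add one if the last element is '-'.
import Mathlib
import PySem

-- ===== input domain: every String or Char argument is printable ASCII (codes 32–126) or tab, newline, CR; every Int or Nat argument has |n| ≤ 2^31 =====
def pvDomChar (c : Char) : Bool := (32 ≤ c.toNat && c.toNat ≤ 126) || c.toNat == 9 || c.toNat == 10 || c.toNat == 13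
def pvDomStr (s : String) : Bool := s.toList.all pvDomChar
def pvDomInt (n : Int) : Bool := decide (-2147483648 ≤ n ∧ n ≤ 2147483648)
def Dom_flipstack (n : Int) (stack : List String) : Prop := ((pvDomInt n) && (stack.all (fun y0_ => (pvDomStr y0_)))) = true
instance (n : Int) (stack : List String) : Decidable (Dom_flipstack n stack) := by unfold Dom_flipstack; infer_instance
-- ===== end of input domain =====

-- B replaces A's stateful linear scan by a divide-and-conquer recursion on index ranges
-- (transitions split at the midpoint); same O(n) cost, a genuinely different traversal.
-- Both raise IndexError on the empty stack (excluded by Pre_).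


-- ===== PORT A =====
-- A: g=0; c=stack[0]; for s in stack[1:]: if s!=c: c=s; g+=1; then if c=="-": g+=1.
-- stack[0] raises IndexError on []; that input is excluded by Pre_flipstack.
def flipstack (n : Int) (stack : List String) : Int :=
  match stack with
  | [] => 0
  | c0 :: rest =>
    let p := rest.foldl (fun (p : Int × String) s => if s ≠ p.2 then (p.1 + 1, s) else p) (0, c0)
    if p.2 = "-" then p.1 + 1 else p.1

-- ===== PORT B =====
-- B's inner trans(lo, hi): divide-and-conquer over the index range; indices passed to it
-- are always in range, so List.getD is exact for stack[mid-1] / stack[mid].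
def transGo (stack : List String) (lo hi : Nat) : Int :=
  if hi ≤ lo + 1 then 0
  else
    let mid := (lo + hi) / 2
    transGo stack lo mid + transGo stack mid hi +
      (if stack.getD (mid - 1) "" ≠ stack.getD mid "" then 1 else 0)
termination_by hi - lo
decreasing_by all_goals omega

-- B: trans(0, len(stack)) + (stack[-1] == "-"); stack[-1] raises IndexError on [].
def flipstack_alt (n : Int) (stack : List String) : Int :=
  transGo stack 0 stack.length + (if stack.getLastD "" = "-" then 1 else 0)

-- ===== PRECONDITION & SPEC =====
-- Pre_ excludes only the empty stack, on which both Pythons raise IndexError.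
def Pre_flipstack (n : Int) (stack : List String) : Prop := stack ≠ []
instance (n : Int) (stack : List String) : Decidable (Pre_flipstack n stack) := by
  unfold Pre_flipstack; infer_instance
def pvWitness_flipstack : Int × List String := (0, ["+", "-", "-"])
def Spec_flipstack (n : Int) (stack : List String) (out : Int) : Prop := out = flipstack_alt n stack
instance (n : Int) (stack : List String) (out : Int) : Decidable (Spec_flipstack n stack out) := by unfold Spec_flipstack; infer_instance

-- ===== CLAIM (what is proved, stated in full; the proofs are below) =====
def Claim_equal_flipstack : Prop := ∀ (n : Int) (stack : List String), Dom_flipstack n stack → Pre_flipstack n stack → Spec_flipstack n stack (flipstack n stack)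

-- ===== LEMMAS AND PROOFS =====

-- the per-pair indicator both counts are about
def indAt (stack : List String) (i : Nat) : Int :=
  if stack.getD (i - 1) "" ≠ stack.getD i "" then 1 else 0

-- B's divide-and-conquer equals the flat sum of indicators over (lo, hi)
theorem transGo_eq_sum (stack : List String) (lo hi : Nat) :
    transGo stack lo hi = ∑ i ∈ Finset.Ico (lo + 1) hi, indAt stack i := by
  rw [transGo]
  split_ifs with h
  · rw [Finset.Ico_eq_empty (by omega), Finset.sum_empty]
  · have hm : lo + 1 ≤ (lo + hi) / 2 ∧ (lo + hi) / 2 < hi := by omega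
    show transGo stack lo ((lo + hi) / 2) + transGo stack ((lo + hi) / 2) hi +
        (if stack.getD ((lo + hi) / 2 - 1) "" ≠ stack.getD ((lo + hi) / 2) "" then 1 else 0) = _
    rw [transGo_eq_sum stack lo ((lo + hi) / 2), transGo_eq_sum stack ((lo + hi) / 2) hi]
    rw [← Finset.sum_Ico_consecutive (indAt stack) (m := lo + 1) (n := (lo + hi) / 2 + 1)
        (k := hi) (by omega) (by omega)]
    rw [Finset.sum_Ico_succ_top (by omega)]
    simp [indAt]
    ring
termination_by hi - lo
decreasing_by all_goals omega

-- shifting the accumulator out of a counting fold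
theorem zfold_shift (l : List (String × String)) (a : Int) :
    l.foldl (fun (acc : Int) ab => acc + (if ab.1 ≠ ab.2 then 1 else 0)) a
      = a + l.foldl (fun (acc : Int) ab => acc + (if ab.1 ≠ ab.2 then 1 else 0)) 0 := by
  induction l generalizing a with
  | nil => simp
  | cons x t ih =>
    simp only [List.foldl]
    rw [ih, ih (0 + _)]
    ring

-- A's running count equals the pairwise zip count
theorem foldA_fst (rest : List String) (c : String) (g : Int) :
    (rest.foldl (fun (p : Int × String) s => if s ≠ p.2 then (p.1 + 1, s) else p) (g, c)).1
      = g + (List.zip (c :: rest) rest).foldl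
              (fun (acc : Int) ab => acc + (if ab.1 ≠ ab.2 then 1 else 0)) 0 := by
  induction rest generalizing c g with
  | nil => simp
  | cons s t ih =>
    rw [List.zip_cons_cons, List.foldl_cons, List.foldl_cons, zfold_shift]
    by_cases h : s = c
    · rw [if_neg (by simp [h]), ih]
      subst h; simp
    · rw [if_pos h, ih, if_pos (show (c, s).1 ≠ (c, s).2 from fun e => h e.symm)]
      ring

-- A's final current symbol is the last element
theorem foldA_snd (rest : List String) (c : String) (g : Int) :
    (rest.foldl (fun (p : Int × String) s => if s ≠ p.2 then (p.1 + 1, s) else p) (g, c)).2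
      = (c :: rest).getLastD "" := by
  induction rest generalizing c g with
  | nil => simp
  | cons s t ih =>
    rw [List.foldl_cons]
    by_cases h : s = c
    · rw [if_neg (by simp [h]), ih]; subst h; simp
    · rw [if_pos h, ih]; simp

-- the pairwise zip count equals the flat sum of indicators over (0, length)
theorem zip_count_eq_sum (l : List String) :
    (List.zip l l.tail).foldl
        (fun (acc : Int) ab => acc + (if ab.1 ≠ ab.2 then 1 else 0)) 0
      = ∑ i ∈ Finset.Ico 1 l.length, indAt l i := by
  induction l with
  | nil => simp
  | cons a t ih =>
    cases t with
    | nil => simp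
    | cons b t' =>
      rw [List.tail_cons] at ih
      rw [List.tail_cons, List.zip_cons_cons, List.foldl_cons, zfold_shift, ih]
      rw [Finset.sum_Ico_eq_sum_range, Finset.sum_Ico_eq_sum_range]
      simp only [List.length_cons]
      have hlen : t'.length + 1 + 1 - 1 = t'.length + 1 := by omega
      have hlen2 : t'.length + 1 - 1 = t'.length := by omega
      rw [hlen, hlen2, Finset.sum_range_succ']
      have e0 : indAt (a :: b :: t') (1 + 0) = (if (a, b).1 ≠ (a, b).2 then (1:Int) else 0) := by
        simp [indAt]
      have es : ∀ x ∈ Finset.range t'.length,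
          indAt (a :: b :: t') (1 + (x + 1)) = indAt (b :: t') (1 + x) := by
        intro x _
        have h1 : 1 + (x + 1) = x + 2 := by omega
        have h2 : 1 + x = x + 1 := by omega
        simp [indAt, h1, h2]
      rw [e0, Finset.sum_congr rfl es]
      ring

-- ===== VERDICT (by name: the statement is the Claim_ definition above) =====
theorem flipstack_spec : Claim_equal_flipstack := by
  intro n stack _ hpre
  match stack with
  | [] => exact absurd rfl hpre
  | c0 :: rest =>
    show flipstack n (c0 :: rest) = flipstack_alt n (c0 :: rest)
    simp only [flipstack, flipstack_alt]
    rw [foldA_fst, foldA_snd, transGo_eq_sum, ← zip_count_eq_sum, List.tail_cons]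
    split_ifs <;> ring
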